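-- pv_equiv track=rewrite | github.com/pypi-data/pypi-mirror-181 | packages/db-hammer/db-hammer-0.0.60.tar.gz/db-hammer-0.0.60/db_hammer/util/array_util.py | cut_list_index
-- ===== SOURCE A (Python) =====
-- def cut_list_index(data_list: list, cut_num=1):
--     """
--     把数组切成指定份数返回数据下标数组
--     :param data_list: 源数组
--     :param cut_num: 切份数
--     :return:
--     """
--     if data_list is None:
--         return None
--     # 数据的份数
--     data_nums = len(data_list)
--     # 数据分片开始
--     cut_start = 0
--     # 分片的数量
--     # 分片大小,为0表示不分片
--     cut_size = data_nums // cut_num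
--     yu = data_nums % cut_num
--     results = []
--     for i in range(0, cut_num):
--         # 先分余
--         if yu > 0:
--             yu -= 1
--             cut_end = cut_start + cut_size + 1
--         else:
--             cut_end = cut_start + cut_size
--         # 是不是最后的一片
--         if cut_end > data_nums - cut_size:
--             cut_end = data_nums
--         results.append((cut_start, cut_end))
--         cut_start = cut_end
--     return results
-- ===== SOURCE B (Python) =====
-- def cut_list_index(data_list: list, cut_num=1):
--     """Closed-form re-implementation: each index range is computed independently
--     by arithmetic instead of a running accumulator."""
--     if data_list is None:
--         return None
--     cut_size, yu = divmod(len(data_list), cut_num)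
--
--     def start(i):
--         return i * cut_size + min(i, yu)
--
--     return [(start(i), start(i + 1)) for i in range(cut_num)]
-- ===== Notes on version B (the rewrite author's own statement) =====
-- stated objective: simpler
-- what changed: Replaces the sequential loop with its mutable cut_start accumulator, yu decrement, remainder branch and tail-truncation guard by a closed-form formula start(i) = i*cut_size + min(i, yu), emitting each range (start(i), start(i+1)) independently.
import Mathlib
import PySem

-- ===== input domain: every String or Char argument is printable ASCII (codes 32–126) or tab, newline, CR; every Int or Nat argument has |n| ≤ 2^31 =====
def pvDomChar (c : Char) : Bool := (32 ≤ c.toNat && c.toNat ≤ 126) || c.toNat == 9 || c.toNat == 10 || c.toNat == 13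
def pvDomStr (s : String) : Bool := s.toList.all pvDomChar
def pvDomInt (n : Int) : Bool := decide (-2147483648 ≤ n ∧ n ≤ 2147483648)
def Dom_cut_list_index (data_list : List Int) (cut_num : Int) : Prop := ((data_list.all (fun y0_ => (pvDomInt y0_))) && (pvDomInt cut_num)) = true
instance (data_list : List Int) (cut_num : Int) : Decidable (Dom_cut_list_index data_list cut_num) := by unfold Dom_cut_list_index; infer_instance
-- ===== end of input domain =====

-- B replaces A's sequential loop (mutable cut_start/yu and a truncation guard) by an
-- independent closed-form formula per chunk; objective: simpler.

-- ===== PORT A =====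
-- A's loop body (one iteration of 'for i in range(0, cut_num)'), state = (cut_start, yu, results)
def pvStepA (data_nums cut_size : Int) (s : Int × Int × List (Int × Int)) (_i : Int) :
    Int × Int × List (Int × Int) :=
  let cut_start := s.1
  let yu := s.2.1
  let results := s.2.2
  let yu' := if yu > 0 then yu - 1 else yu
  let cut_end0 := if yu > 0 then cut_start + cut_size + 1 else cut_start + cut_size
  let cut_end := if cut_end0 > data_nums - cut_size then data_nums else cut_end0
  (cut_end, yu', results ++ [(cut_start, cut_end)])

def cut_list_index (data_list : List Int) (cut_num : Int) : Option (List (Int × Int)) :=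
  let data_nums : Int := data_list.length
  match PySem.Int.divmod? data_nums cut_num with
  | none => none   -- cut_num == 0 : Python raises ZeroDivisionError (excluded by Pre_)
  | some (cut_size, yu0) =>
    some (((PySem.List.pyRange 0 cut_num 1).foldl (pvStepA data_nums cut_size)
      (0, yu0, [])).2.2)

-- ===== PORT B =====
def cut_list_index_alt (data_list : List Int) (cut_num : Int) : Option (List (Int × Int)) :=
  match PySem.Int.divmod? (data_list.length : Int) cut_num with
  | none => none   -- cut_num == 0 : Python raises ZeroDivisionError (excluded by Pre_)
  | some (cut_size, yu) =>
    some ((PySem.List.pyRange 0 cut_num 1).map (fun i =>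
      (i * cut_size + min i yu, (i + 1) * cut_size + min (i + 1) yu)))

-- ===== PRECONDITION & SPEC =====
-- Pre_ excludes exactly cut_num = 0, where Python A raises ZeroDivisionError.
def Pre_cut_list_index (data_list : List Int) (cut_num : Int) : Prop := cut_num ≠ 0
instance (data_list : List Int) (cut_num : Int) : Decidable (Pre_cut_list_index data_list cut_num) := by unfold Pre_cut_list_index; infer_instance

def pvWitness_cut_list_index : List Int × Int := ([1, 2, 3, 4, 5], 2)

def Spec_cut_list_index (data_list : List Int) (cut_num : Int) (out : Option (List (Int × Int))) : Prop := out = cut_list_index_alt data_list cut_num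
instance (data_list : List Int) (cut_num : Int) (out : Option (List (Int × Int))) : Decidable (Spec_cut_list_index data_list cut_num out) := by unfold Spec_cut_list_index; infer_instance

-- ===== CLAIM (what is proved, stated in full; the proofs are below) =====
def Claim_equal_cut_list_index : Prop := ∀ (data_list : List Int) (cut_num : Int), Dom_cut_list_index data_list cut_num → Pre_cut_list_index data_list cut_num → Spec_cut_list_index data_list cut_num (cut_list_index data_list cut_num)

-- ===== LEMMAS AND PROOFS =====

-- A's truncation guard never changes the value: the closed-form end of chunk a is
-- already ≤ data_nums - cut_size for a non-final chunk, and equals data_nums for the final one.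
theorem pvClampNoop (n cn cs yu0 a : Int) (hcs0 : 0 ≤ cs) (hy0 : 0 ≤ yu0) (hylt : yu0 < cn)
    (hsum : cs * cn + yu0 = n) (ha : 0 ≤ a) (hacn : a < cn) :
    (if (a + 1) * cs + min (a + 1) yu0 > n - cs then n else (a + 1) * cs + min (a + 1) yu0)
      = (a + 1) * cs + min (a + 1) yu0 := by
  by_cases hlast : a + 1 = cn
  · have hmin : min (a + 1) yu0 = yu0 := min_eq_right (by omega)
    have hE : (a + 1) * cs + min (a + 1) yu0 = n := by
      rw [hmin, hlast]; linarith [mul_comm cn cs]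
    rw [hE]; split <;> rfl
  · have h1 : (a + 1) * cs ≤ (cn - 1) * cs :=
      mul_le_mul_of_nonneg_right (by omega) hcs0
    have h2 : (cn - 1) * cs = cs * cn - cs := by ring
    have h3 : min (a + 1) yu0 ≤ yu0 := min_le_right _ _
    have : ¬ ((a + 1) * cs + min (a + 1) yu0 > n - cs) :=
      not_lt.mpr (by linarith)
    rw [if_neg this]

-- Loop invariant: starting from the closed-form state for index a, A's fold over
-- range(a, cn) appends exactly B's closed-form pairs.
theorem pvLoopA (n cn cs yu0 : Int) (hcn : 0 < cn)
    (hcs0 : 0 ≤ cs) (hy0 : 0 ≤ yu0) (hylt : yu0 < cn) (hsum : cs * cn + yu0 = n) :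
    ∀ (k : Nat) (a : Int) (acc : List (Int × Int)), 0 ≤ a → a + k = cn →
    ((PySem.List.pyRange a cn 1).foldl (pvStepA n cs)
        (a * cs + min a yu0, yu0 - min a yu0, acc)).2.2
      = acc ++ (PySem.List.pyRange a cn 1).map
          (fun i => (i * cs + min i yu0, (i + 1) * cs + min (i + 1) yu0)) := by
  intro k
  induction k with
  | zero =>
    intro a acc ha hk
    rw [PySem.List.pyRange_one_eq_nil (by omega)]
    simp
  | succ k ih =>
    intro a acc ha hk
    have hacn : a < cn := by omega
    rw [PySem.List.pyRange_one_cons hacn]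
    simp only [List.foldl_cons, List.map_cons]
    have hstep : pvStepA n cs (a * cs + min a yu0, yu0 - min a yu0, acc) a
        = ((a + 1) * cs + min (a + 1) yu0, yu0 - min (a + 1) yu0,
           acc ++ [(a * cs + min a yu0, (a + 1) * cs + min (a + 1) yu0)]) := by
      by_cases hlt : a < yu0
      · have hma : min a yu0 = a := min_eq_left (by omega)
        have hma1 : min (a + 1) yu0 = a + 1 := min_eq_left (by omega)
        have hyu : yu0 - min a yu0 > 0 := by omega
        simp only [pvStepA, if_pos hyu]
        have hE : a * cs + min a yu0 + cs + 1 = (a + 1) * cs + min (a + 1) yu0 := by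
          rw [hma, hma1]; ring
        rw [hE, pvClampNoop n cn cs yu0 a hcs0 hy0 hylt hsum ha hacn]
        refine Prod.ext rfl (Prod.ext ?_ rfl)
        simp only
        omega
      · have hma : min a yu0 = yu0 := min_eq_right (by omega)
        have hma1 : min (a + 1) yu0 = yu0 := min_eq_right (by omega)
        have hyu : ¬ (yu0 - min a yu0 > 0) := by omega
        simp only [pvStepA, if_neg hyu]
        have hE : a * cs + min a yu0 + cs = (a + 1) * cs + min (a + 1) yu0 := by
          rw [hma, hma1]; ring
        rw [hE, pvClampNoop n cn cs yu0 a hcs0 hy0 hylt hsum ha hacn, hma, hma1]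
    rw [hstep, ih (a + 1) _ (by omega) (by omega)]
    simp

-- ===== VERDICT (by name: the statement is the Claim_ definition above) =====
theorem cut_list_index_spec : Claim_equal_cut_list_index := by
  intro data_list cut_num _ hpre
  unfold Spec_cut_list_index cut_list_index cut_list_index_alt
  have hdm : PySem.Int.divmod? (data_list.length : Int) cut_num
      = some (PySem.Int.floordiv (data_list.length : Int) cut_num,
              PySem.Int.mod (data_list.length : Int) cut_num) := by
    unfold Pre_cut_list_index at hpre
    simp [PySem.Int.divmod?, PySem.Int.floordiv, PySem.Int.mod, hpre]
  have hpre' : cut_num ≠ 0 := hpre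
  rcases lt_or_gt_of_ne hpre' with hneg | hpos
  · rw [PySem.List.pyRange_one_eq_nil (by omega)]
    simp only [hdm, List.foldl_nil, List.map_nil]
  · set n : Int := (data_list.length : Int) with hn
    have hn0 : 0 ≤ n := by positivity
    set cs := PySem.Int.floordiv n cut_num with hcs
    set yu0 := PySem.Int.mod n cut_num with hyu0
    have hy0 : 0 ≤ yu0 := PySem.Int.mod_nonneg _ hpos
    have hylt : yu0 < cut_num := PySem.Int.mod_lt _ hpos
    have hsum : cs * cut_num + yu0 = n := PySem.Int.floordiv_mul_add_mod n cut_num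
    have hcs0 : 0 ≤ cs := by nlinarith
    have h0 := pvLoopA n cut_num cs yu0 hpos hcs0 hy0 hylt hsum cut_num.toNat 0 []
      le_rfl (by omega)
    simp only [min_eq_left hy0, zero_mul, zero_add, Int.sub_zero,
      List.nil_append] at h0
    simp only [hdm]
    rw [h0]
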